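-- pv_equiv track=rewrite | github.com/qkrtmdtj04/PSS_joonhub_Python | 백준/Silver/1205. 등수 구하기/등수 구하기.py | find_rank
-- ===== SOURCE A (Python) =====
-- def find_rank(ranking, new_score, P):
--     left, right = 0, len(ranking)
--
--     while left < right:
--         mid = (left + right) // 2
--         if ranking[mid] > new_score:
--             left = mid + 1
--         else:
--             right = mid
--
--     return left + 1
-- ===== SOURCE B (Python) =====
-- def find_rank(ranking, new_score, P):
--     # Recursive divide-and-conquer on the interval length: go(base, n) ranks
--     # new_score within the window ranking[base:base+n], halving n each step.
--     def go(base, n):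
--         if n == 0:
--             return base + 1
--         h = n // 2
--         if ranking[base + h] > new_score:
--             return go(base + h + 1, n - h - 1)
--         return go(base, h)
--     return go(0, len(ranking))
-- ===== Notes on version B (the rewrite author's own statement) =====
-- stated objective: alternative
-- what changed: The iterative two-pointer (left,right) while-loop with the +1 applied after the loop is re-decomposed as a structural recursion go(base,n) on the interval length n, which halves n each call and returns base+1 at the empty interval.
import Mathlib
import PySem

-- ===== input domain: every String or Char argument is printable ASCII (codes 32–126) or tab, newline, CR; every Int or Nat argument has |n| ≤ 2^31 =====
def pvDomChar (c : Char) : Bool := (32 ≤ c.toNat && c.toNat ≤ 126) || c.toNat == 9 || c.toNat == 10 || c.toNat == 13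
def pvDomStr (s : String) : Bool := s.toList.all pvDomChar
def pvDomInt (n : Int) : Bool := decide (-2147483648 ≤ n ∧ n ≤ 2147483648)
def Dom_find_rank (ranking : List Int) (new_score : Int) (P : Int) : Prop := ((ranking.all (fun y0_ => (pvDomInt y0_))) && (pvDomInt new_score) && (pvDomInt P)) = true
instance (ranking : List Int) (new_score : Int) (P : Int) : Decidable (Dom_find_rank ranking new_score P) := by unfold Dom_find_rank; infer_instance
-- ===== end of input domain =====

-- B re-decomposes A's iterative (left,right) binary-search loop as a structural
-- recursion on the interval length (same comparisons, same result; objective: alternative).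

-- ===== PORT A =====
-- the while loop: state (left, right); ranking[mid] is always in range (left ≤ mid < right ≤ len),
-- so List.getD is exact for Python's ranking[mid] here
def findRankLoop (ranking : List Int) (new_score : Int) (left right : Nat) : Nat :=
  if left < right then
    let mid := (left + right) / 2
    if ranking.getD mid 0 > new_score then
      findRankLoop ranking new_score (mid + 1) right
    else
      findRankLoop ranking new_score left mid
  else
    left
termination_by right - left
decreasing_by all_goals simp_all; omega

def find_rank (ranking : List Int) (new_score : Int) (P : Int) : Int :=
  (findRankLoop ranking new_score 0 ranking.length : Int) + 1

-- ===== PORT B =====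
-- go(base, n): rank within the window ranking[base : base+n], recursing on the length n
def findRankGo (ranking : List Int) (new_score : Int) (base n : Nat) : Int :=
  if n = 0 then (base : Int) + 1
  else
    let h := n / 2
    if ranking.getD (base + h) 0 > new_score then
      findRankGo ranking new_score (base + h + 1) (n - h - 1)
    else
      findRankGo ranking new_score base h
termination_by n
decreasing_by all_goals omega

def find_rank_alt (ranking : List Int) (new_score : Int) (P : Int) : Int :=
  findRankGo ranking new_score 0 ranking.length

-- ===== PRECONDITION & SPEC =====
def Spec_find_rank (ranking : List Int) (new_score : Int) (P : Int) (out : Int) : Prop := out = find_rank_alt ranking new_score P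
instance (ranking : List Int) (new_score : Int) (P : Int) (out : Int) : Decidable (Spec_find_rank ranking new_score P out) := by unfold Spec_find_rank; infer_instance

-- ===== CLAIM (what is proved, stated in full; the proofs are below) =====
def Claim_equal_find_rank : Prop := ∀ (ranking : List Int) (new_score : Int) (P : Int), Dom_find_rank ranking new_score P → Spec_find_rank ranking new_score P (find_rank ranking new_score P)

-- ===== LEMMAS AND PROOFS =====

-- ===== VERDICT (by name: the statement is the Claim_ definition above) =====
theorem go_eq_loop (ranking : List Int) (new_score : Int) :
    ∀ n l, findRankGo ranking new_score l n = (findRankLoop ranking new_score l (l + n) : Int) + 1 := by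
  intro n
  induction n using Nat.strong_induction_on with
  | _ n ih =>
    intro l
    rw [findRankGo, findRankLoop]
    by_cases hn : n = 0
    · simp [hn]
    · have hlt : l < l + n := by omega
      simp only [if_pos hlt, if_neg hn]
      have hmid : (l + (l + n)) / 2 = l + n / 2 := by omega
      rw [hmid]
      split_ifs with hc
      · have : l + n = (l + n / 2 + 1) + (n - n / 2 - 1) := by omega
        rw [this, ← ih (n - n / 2 - 1) (by omega)]
      · rw [← ih (n / 2) (by omega)]

theorem find_rank_spec : Claim_equal_find_rank := by
  intro ranking new_score P _
  unfold Spec_find_rank find_rank find_rank_alt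
  rw [go_eq_loop]
  simp
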